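-- pv_equiv track=rewrite | github.com/2kindsofcs/daily-algo-challenge | 2kindsofcs/190807-verifying-an-alien-dictionary.py | isAlienSorted
-- ===== SOURCE A (Python) =====
-- from typing import List
--
-- def isAlienSorted(words: List[str], order: str) -> bool:
--     wordCount = len(words)
--     for i in range(wordCount-1):
--         word1, word2 = words[i], words[i+1]
--         smallerLength = min(len(word1), len(word2))
--         if smallerLength == len(word2) and word1[:len(word2)] == word2:
--             return False
--         for j in range(smallerLength):
--             if order.index(word1[j]) < order.index(word2[j]):
--                 break
--             elif order.index(word1[j]) == order.index(word2[j]):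
--                 continue
--             return False
--     return True
-- ===== SOURCE B (Python) =====
-- def isAlienSorted(words, order):
--     trans = [[order.find(c) for c in w] for w in words]
--     return all(a <= b for a, b in zip(trans, trans[1:]))
-- ===== Notes on version B (the rewrite author's own statement) =====
-- stated objective: idiomatic
-- what changed: B eagerly translates every word into its list of alphabet ranks (str.find, -1 for absent characters) and then checks sortedness with Python's built-in lexicographic list comparison over adjacent pairs, eliminating A's per-character scanning loop with break/continue and the explicit prefix special-case.
-- intended difference: On word lists that are non-decreasing in find-rank order but contain an equal adjacent pair (e.g. a repeated word), A returns False because its prefix test fires on equal words, while B returns True, the intended value since equal adjacent words are sorted. — e.g. on isAlienSorted(["a", "a"], "a"): A returns false, B returns true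
import Mathlib
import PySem

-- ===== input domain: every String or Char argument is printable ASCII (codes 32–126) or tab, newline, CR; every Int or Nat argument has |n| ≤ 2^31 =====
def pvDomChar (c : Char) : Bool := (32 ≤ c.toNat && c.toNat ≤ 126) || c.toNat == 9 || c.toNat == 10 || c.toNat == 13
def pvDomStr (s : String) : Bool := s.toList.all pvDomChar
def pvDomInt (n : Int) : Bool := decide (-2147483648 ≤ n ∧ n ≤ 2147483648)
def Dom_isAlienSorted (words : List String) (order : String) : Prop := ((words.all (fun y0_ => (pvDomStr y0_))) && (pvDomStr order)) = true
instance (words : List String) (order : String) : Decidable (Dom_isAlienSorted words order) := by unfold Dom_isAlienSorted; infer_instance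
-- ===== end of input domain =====

-- B translates every word eagerly into its list of alphabet ranks (str.find, so absent
-- characters rank -1 and nothing raises) and checks the translated list is non-decreasing
-- under built-in lexicographic list comparison, instead of A's nested per-character scan with
-- break/continue and an explicit prefix special-case (objective: idiomatic); on sorted lists
-- with an equal adjacent pair A wrongly returns False while B returns True (see D_ below).

-- ===== PORT A =====
-- order.index(c): exact whenever c occurs in order (Pre_ guarantees this for every character
-- A actually indexes); Python raises ValueError otherwise, which Pre_ excludes.
def pvIdx (os : List Char) (c : Char) : Int := (os.idxOf c : Int)

-- the inner 'for j in range(smallerLength)' loop: structural recursion over both words in step;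
-- true = loop ended by break or exhaustion (continue outer loop), false = 'return False'
def pvScanA (os : List Char) : List Char → List Char → Bool
  | c1 :: r1, c2 :: r2 =>
    if pvIdx os c1 < pvIdx os c2 then true
    else if pvIdx os c1 == pvIdx os c2 then pvScanA os r1 r2
    else false
  | _, _ => true

-- the outer 'for i in range(wordCount-1)' loop over adjacent pairs
-- (word1[:len(word2)] is List.take: exact, the slice bound is a non-negative length)
def pvLoopA (os : List Char) : List (List Char) → Bool
  | w1 :: w2 :: rest =>
    if (min w1.length w2.length == w2.length) && (w1.take w2.length == w2) then false
    else if pvScanA os w1 w2 then pvLoopA os (w2 :: rest) else false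
  | _ => true

def isAlienSorted (words : List String) (order : String) : Bool :=
  pvLoopA order.toList (words.map String.toList)

-- ===== PORT B =====
-- order.find(c) for a single character c: its first index in order, or -1 if absent; exact
def pvRankB (os : List Char) (c : Char) : Int :=
  if c ∈ os then (os.idxOf c : Int) else -1

-- [order.find(c) for c in w]
def pvTransB (os : List Char) (w : List Char) : List Int :=
  w.map (pvRankB os)

-- Python's built-in 'a <= b' on lists of ints: lexicographic, shorter-prefix-first
def pvListLe : List Int → List Int → Bool
  | [], _ => true
  | _ :: _, [] => false
  | x :: xs, y :: ys => if x < y then true else if y < x then false else pvListLe xs ys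

-- trans = [[order.find(c) for c in w] for w in words]
-- return all(a <= b for a, b in zip(trans, trans[1:]))
def isAlienSorted_alt (words : List String) (order : String) : Bool :=
  let trans := words.map (fun w => pvTransB order.toList w.toList)
  (trans.zip (trans.drop 1)).all (fun p => pvListLe p.1 p.2)

-- ===== PRECONDITION & SPEC =====
-- every character the A scan touches on this pair occurs in order: the touched region is the
-- common prefix plus the first mismatch, capped at the shorter word (take/findIdx shape)
def pvTouched (os a b : List Char) : Bool :=
  (a.take (min (((a.zip b).findIdx fun p => p.1 != p.2) + 1) (min a.length b.length))
    ++ b.take (min (((a.zip b).findIdx fun p => p.1 != p.2) + 1) (min a.length b.length))).all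
    (os.contains ·)

-- the list of first-occurrence positions in order of a word's characters
def pvRanks (order : String) (w : String) : List Nat :=
  w.toList.map (fun c => order.toList.idxOf c)

-- strict lexicographic order of two words under the alien alphabet
def pvAlienLtB (order : String) (a b : String) : Bool :=
  decide (List.Lex (· < ·) (pvRanks order a) (pvRanks order b))

-- one adjacent pair passes A's scan without touching a character outside order
def pvPairOk (words : List String) (order : String) (j : Nat) : Bool :=
  pvTouched order.toList (words.getD j "").toList (words.getD (j + 1) "").toList
  && pvAlienLtB order (words.getD j "") (words.getD (j + 1) "")

-- Pre_ is exactly the inputs on which Python A returns normally (no ValueError): at most one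
-- word; or every adjacent pair touches only characters of order and is strictly increasing
-- (A returns True); or some pair k decides False before any bad character is indexed — all
-- earlier pairs good and increasing, and pair k is a prefix case (word k+1 a prefix of word k,
-- checked before any indexing) or good and not increasing.
def Pre_isAlienSorted (words : List String) (order : String) : Prop :=
  words.length ≤ 1
  ∨ ((List.range (words.length - 1)).all (fun j => pvPairOk words order j)) = true
  ∨ ((List.range (words.length - 1)).any (fun k =>
      ((List.range k).all (fun j => pvPairOk words order j)) &&
      (decide ((words.getD (k + 1) "").toList <+: (words.getD k "").toList)
       || (pvTouched order.toList (words.getD k "").toList (words.getD (k + 1) "").toList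
           && ! pvAlienLtB order (words.getD k "") (words.getD (k + 1) ""))))) = true

instance (words : List String) (order : String) : Decidable (Pre_isAlienSorted words order) := by
  unfold Pre_isAlienSorted; infer_instance

def pvWitness_isAlienSorted : List String × String := (["ab", "b", "ba"], "ab")

-- the find-based rank list of a word: first occurrence position in order, -1 if absent
-- (an input-shape helper for D_, independent of the ports)
def pvRanksD (order : String) (w : String) : List Int :=
  w.toList.map fun c => if c ∈ order.toList then order.toList.idxOf c else -1

-- On word lists non-decreasing in find-rank order that contain an equal adjacent pair, A
-- returns False (its prefix test fires on equal words) while B returns True, the intended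
-- value since equal adjacent words are sorted.
def D_isAlienSorted (words : List String) (order : String) : Prop :=
  (words.IsChain fun a b => ¬ List.Lex (· < ·) (pvRanksD order b) (pvRanksD order a))
  ∧ ¬ words.IsChain (· ≠ ·)
instance (words : List String) (order : String) : Decidable (D_isAlienSorted words order) := by
  unfold D_isAlienSorted; infer_instance

def Spec_isAlienSorted (words : List String) (order : String) (out : Bool) : Prop :=
  ¬ D_isAlienSorted words order → out = isAlienSorted_alt words order
instance (words : List String) (order : String) (out : Bool) : Decidable (Spec_isAlienSorted words order out) := by unfold Spec_isAlienSorted; infer_instance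

def pvDiffWitness_isAlienSorted : List String × String := (["a", "a"], "a")
def pvDiffWitnessOut_isAlienSorted : Bool × Bool := (false, true)

-- ===== CLAIM (what is proved, stated in full; the proofs are below) =====
def Claim_unchanged_isAlienSorted : Prop := ∀ (words : List String) (order : String), Dom_isAlienSorted words order → Pre_isAlienSorted words order → Spec_isAlienSorted words order (isAlienSorted words order)
def Claim_changed_isAlienSorted : Prop := Dom_isAlienSorted (pvDiffWitness_isAlienSorted.1) (pvDiffWitness_isAlienSorted.2) ∧ Pre_isAlienSorted (pvDiffWitness_isAlienSorted.1) (pvDiffWitness_isAlienSorted.2) ∧ D_isAlienSorted (pvDiffWitness_isAlienSorted.1) (pvDiffWitness_isAlienSorted.2) ∧ isAlienSorted (pvDiffWitness_isAlienSorted.1) (pvDiffWitness_isAlienSorted.2) = pvDiffWitnessOut_isAlienSorted.1 ∧ isAlienSorted_alt (pvDiffWitness_isAlienSorted.1) (pvDiffWitness_isAlienSorted.2) = pvDiffWitnessOut_isAlienSorted.2 ∧ pvDiffWitnessOut_isAlienSorted.1 ≠ pvDiffWitnessOut_isAlienSorted.2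
def Claim_exact_isAlienSorted : Prop := ∀ (words : List String) (order : String), Dom_isAlienSorted words order → Pre_isAlienSorted words order → D_isAlienSorted words order → isAlienSorted words order ≠ isAlienSorted_alt words order

-- ===== LEMMAS AND PROOFS =====

-- Boolean recursive form of the touched-characters condition, used by the proofs
def pvTouchedGood (os : List Char) : List Char → List Char → Bool
  | x :: xs, y :: ys =>
    if x = y then os.contains x && pvTouchedGood os xs ys
    else os.contains x && os.contains y
  | _, _ => true

theorem pvTouched_eq (os : List Char) (a b : List Char) :
    pvTouched os a b = pvTouchedGood os a b := by
  induction a generalizing b with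
  | nil => cases b <;> simp [pvTouched, pvTouchedGood]
  | cons x xs ih =>
    cases b with
    | nil => simp [pvTouched, pvTouchedGood]
    | cons y ys =>
      by_cases hxy : x = y
      · subst hxy
        have hfi : (((x :: xs).zip (x :: ys)).findIdx fun p => p.1 != p.2)
            = ((xs.zip ys).findIdx fun p => p.1 != p.2) + 1 := by
          simp [List.findIdx_cons]
        have hn : min ((((x :: xs).zip (x :: ys)).findIdx fun p => p.1 != p.2) + 1)
              (min (x :: xs).length (x :: ys).length)
            = (min (((xs.zip ys).findIdx fun p => p.1 != p.2) + 1) (min xs.length ys.length)) + 1 := by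
          rw [hfi]
          simp only [List.length_cons]
          omega
        have hgE : pvTouchedGood os (x :: xs) (x :: ys)
            = (os.contains x && pvTouchedGood os xs ys) := by
          simp [pvTouchedGood]
        have ih' : ((xs.take (min (((xs.zip ys).findIdx fun p => p.1 != p.2) + 1)
                (min xs.length ys.length))).all (os.contains ·)
              && (ys.take (min (((xs.zip ys).findIdx fun p => p.1 != p.2) + 1)
                (min xs.length ys.length))).all (os.contains ·))
            = pvTouchedGood os xs ys := by
          simpa [pvTouched, List.all_append] using ih ys
        simp only [pvTouched, hn, List.take_succ_cons, List.all_append, List.all_cons]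
        rw [hgE, ← ih']
        cases os.contains x <;> simp
      · have hb : (x != y) = true := by simpa using hxy
        have hfi : (((x :: xs).zip (y :: ys)).findIdx fun p => p.1 != p.2) = 0 := by
          simp [List.findIdx_cons, hb]
        have hn : min ((((x :: xs).zip (y :: ys)).findIdx fun p => p.1 != p.2) + 1)
              (min (x :: xs).length (y :: ys).length) = 1 := by
          rw [hfi]
          simp only [List.length_cons]
          omega
        simp only [pvTouched, hn, List.take_succ_cons, List.take_zero, List.all_append,
          List.all_cons, List.all_nil, Bool.and_true, pvTouchedGood, if_neg hxy]

-- A's per-pair verdict (prefix test, then the rank scan)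
def pvPairA (os : List Char) (a b : List Char) : Bool :=
  if (min a.length b.length == b.length) && (a.take b.length == b) then false else pvScanA os a b

theorem pvLoopA_cons2 (os : List Char) (a b : List Char) (r : List (List Char)) :
    pvLoopA os (a :: b :: r) = (pvPairA os a b && pvLoopA os (b :: r)) := by
  simp only [pvLoopA, pvPairA]
  by_cases hp : ((min a.length b.length == b.length) && (a.take b.length == b)) = true
  · simp [hp]
  · cases hs : pvScanA os a b <;> simp [hp]

theorem pvLoopA_eq_all (os : List Char) (ws : List (List Char)) :
    pvLoopA os ws = (ws.zip (ws.drop 1)).all (fun p => pvPairA os p.1 p.2) := by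
  induction ws with
  | nil => simp [pvLoopA]
  | cons a t ih =>
    cases t with
    | nil => simp [pvLoopA]
    | cons b r =>
      have hz : (a :: b :: r).zip ((a :: b :: r).drop 1)
          = (a, b) :: ((b :: r).zip ((b :: r).drop 1)) := rfl
      rw [hz, List.all_cons, ← ih, pvLoopA_cons2]

-- A as an 'all' over adjacent word pairs
theorem pvA_eq_all (words : List String) (order : String) :
    isAlienSorted words order
      = ((words.zip (words.drop 1)).all
          (fun p => pvPairA order.toList p.1.toList p.2.toList)) := by
  unfold isAlienSorted
  rw [pvLoopA_eq_all, ← List.map_drop, List.zip_map, List.all_map]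
  rfl

-- B's all over trans equals the same all over the original words
theorem pv_alt_reindex (words : List String) (order : String) :
    isAlienSorted_alt words order
      = ((words.zip (words.drop 1)).all
          (fun p => pvListLe (pvTransB order.toList p.1.toList) (pvTransB order.toList p.2.toList))) := by
  unfold isAlienSorted_alt
  show ((words.map (fun w => pvTransB order.toList w.toList)).zip
      ((words.map (fun w => pvTransB order.toList w.toList)).drop 1)).all
      (fun p => pvListLe p.1 p.2) = _
  rw [← List.map_drop, List.zip_map, List.all_map]
  rfl

-- members of os with equal first-occurrence index are equal
theorem pvIdx_inj (os : List Char) (c1 c2 : Char) (h1 : c1 ∈ os) (h2 : c2 ∈ os)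
    (h : os.idxOf c1 = os.idxOf c2) : c1 = c2 := by
  have l1 : os.idxOf c1 < os.length := List.idxOf_lt_length_of_mem h1
  have g1 : os[os.idxOf c1] = c1 := List.getElem_idxOf l1
  have g2 : os[os.idxOf c2] = c2 := List.getElem_idxOf (List.idxOf_lt_length_of_mem h2)
  rw [← g1, ← g2]
  simp [h]

theorem pv_lex_asymm {α : Type} [LinearOrder α] (xs ys : List α)
    (h : List.Lex (· < ·) xs ys) : ¬ List.Lex (· < ·) ys xs := by
  induction h with
  | nil => exact List.not_lex_nil
  | rel hr =>
    intro h'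
    cases h' with
    | rel hr' => exact absurd (lt_trans hr hr') (lt_irrefl _)
    | cons _ => exact absurd hr (lt_irrefl _)
  | cons _ ih =>
    intro h'
    cases h' with
    | rel hr' => exact absurd hr' (lt_irrefl _)
    | cons h'' => exact ih h''

-- pvListLe is the Boolean form of "not strictly greater"
theorem pvListLe_iff (xs ys : List Int) :
    pvListLe xs ys = true ↔ ¬ List.Lex (· < ·) ys xs := by
  induction xs generalizing ys with
  | nil =>
    cases ys with
    | nil => simp [pvListLe, List.not_lex_nil]
    | cons y t => simp [pvListLe, List.not_lex_nil]
  | cons x xs ih =>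
    cases ys with
    | nil =>
      simp only [pvListLe, Bool.false_eq_true, false_iff, not_not]
      exact List.Lex.nil
    | cons y ys =>
      simp only [pvListLe]
      rcases lt_trichotomy x y with h | h | h
      · have : ¬ List.Lex (· < ·) (y :: ys) (x :: xs) :=
          pv_lex_asymm _ _ (List.Lex.rel h)
        simp [h, this]
      · subst h
        have h1 : ¬ x < x := lt_irrefl x
        rw [if_neg h1, if_neg h1, ih ys, List.lex_cons_iff]
      · have : List.Lex (· < ·) (y :: ys) (x :: xs) := List.Lex.rel h
        simp [not_lt_of_gt h, h, this]

-- IsChain over a list is the same as a property of every adjacent pair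
theorem pv_chain'_iff {α : Type} (r : α → α → Prop) (l : List α) :
    List.IsChain r l ↔ ∀ p ∈ l.zip (l.drop 1), r p.1 p.2 := by
  induction l with
  | nil => simp [List.IsChain.nil]
  | cons a t ih =>
    cases t with
    | nil => simp [List.IsChain.singleton]
    | cons b u =>
      rw [List.isChain_cons_cons]
      have hz : (a :: b :: u).zip ((a :: b :: u).drop 1)
          = (a, b) :: ((b :: u).zip ((b :: u).drop 1)) := rfl
      rw [hz]
      constructor
      · rintro ⟨h1, h2⟩ p hp
        rcases List.mem_cons.mp hp with rfl | hp'
        · exact h1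
        · exact (ih.mp h2) p hp'
      · intro H
        exact ⟨H (a, b) List.mem_cons_self,
          ih.mpr (fun p hp => H p (List.mem_cons_of_mem _ hp))⟩

-- D_'s first conjunct is B's adjacent-pair check
theorem pvD1_iff_B_all (words : List String) (order : String) :
    List.IsChain (fun a b => ¬ List.Lex (· < ·) (pvRanksD order b) (pvRanksD order a)) words
      ↔ ((words.zip (words.drop 1)).all
          (fun p => pvListLe (pvTransB order.toList p.1.toList) (pvTransB order.toList p.2.toList))) = true := by
  rw [pv_chain'_iff, List.all_eq_true]
  exact ⟨fun H p hp => (pvListLe_iff _ _).mpr (H p hp),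
         fun H p hp => (pvListLe_iff _ _).mp (H p hp)⟩

-- D_'s second conjunct is the existence of an equal adjacent pair
theorem pvD2_iff (words : List String) :
    ¬ List.IsChain (fun a b => a ≠ b) words
      ↔ ((words.zip (words.drop 1)).any (fun p => p.1 == p.2)) = true := by
  rw [pv_chain'_iff, List.any_eq_true]
  constructor
  · intro h
    rcases not_forall.mp h with ⟨p, hp⟩
    rcases Classical.not_imp.mp hp with ⟨hmem, hne⟩
    exact ⟨p, hmem, by simpa using not_not.mp hne⟩
  · rintro ⟨p, hp, he⟩ H
    exact H p hp (by simpa using he)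

-- the k-th adjacent pair is a member of the zipped pair list
theorem pv_zip_adj_mem {α : Type} (l : List α) (d : α) (k : Nat) (hk : k < l.length - 1) :
    (l.getD k d, l.getD (k + 1) d) ∈ l.zip (l.drop 1) := by
  have h1 : k < l.length := by omega
  have h2 : k + 1 < l.length := by omega
  have h3 : k < (l.zip (l.drop 1)).length := by
    rw [List.length_zip, List.length_drop]; omega
  refine List.mem_iff_getElem.mpr ⟨k, h3, ?_⟩
  rw [List.getElem_zip, List.getElem_drop, List.getD_eq_getElem l d h1,
    List.getD_eq_getElem l d h2]
  simp [Nat.add_comm]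

-- every member of the zipped pair list is a k-th adjacent pair
theorem pv_zip_adj_index {α : Type} (l : List α) (d : α) (p : α × α)
    (hp : p ∈ l.zip (l.drop 1)) :
    ∃ k, k < l.length - 1 ∧ p.1 = l.getD k d ∧ p.2 = l.getD (k + 1) d := by
  obtain ⟨k, hk, he⟩ := List.mem_iff_getElem.mp hp
  have hkl : k < l.length - 1 := by
    rw [List.length_zip, List.length_drop] at hk; omega
  have h1 : k < l.length := by omega
  have h2 : k + 1 < l.length := by omega
  refine ⟨k, hkl, ?_, ?_⟩
  · rw [List.getD_eq_getElem l d h1, ← he, List.getElem_zip]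
  · rw [List.getD_eq_getElem l d h2, ← he, List.getElem_zip, List.getElem_drop]
    simp [Nat.add_comm]

-- A's per-pair verdict is the strict lexicographic comparison of the rank lists, when the
-- touched characters lie in os
theorem pvPairA_iff (os : List Char) (a b : List Char)
    (hg : pvTouchedGood os a b = true) :
    pvPairA os a b = true
      ↔ List.Lex (· < ·) (a.map (fun c => os.idxOf c)) (b.map (fun c => os.idxOf c)) := by
  induction a generalizing b with
  | nil =>
    cases b with
    | nil => simp [pvPairA, List.not_lex_nil]
    | cons y ys =>
      simp only [pvPairA, List.length_nil, List.take_nil, List.map_nil, List.map_cons]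
      refine ⟨fun _ => List.Lex.nil, fun _ => ?_⟩
      simp [pvScanA]
  | cons x xs ih =>
    cases b with
    | nil =>
      simp [pvPairA, List.not_lex_nil]
    | cons y ys =>
      by_cases hxy : x = y
      · subst hxy
        have hg' : pvTouchedGood os xs ys = true := by
          simp [pvTouchedGood] at hg; exact hg.2
        have hstep : pvPairA os (x :: xs) (x :: ys) = pvPairA os xs ys := by
          unfold pvPairA
          have hmin : ((min (x :: xs).length (x :: ys).length == (x :: ys).length) : Bool)
              = (min xs.length ys.length == ys.length) := by
            simp only [List.length_cons]
            by_cases h : min xs.length ys.length = ys.length <;> simp_all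
          have htake : (((x :: xs).take (x :: ys).length == (x :: ys)) : Bool)
              = (xs.take ys.length == ys) := by
            simp [List.take_succ_cons]
          have hscan : pvScanA os (x :: xs) (x :: ys) = pvScanA os xs ys := by
            simp [pvScanA]
          rw [hmin, htake, hscan]
        rw [hstep]
        simp only [List.map_cons]
        rw [List.lex_cons_iff]
        exact ih ys hg'
      · have hx : x ∈ os := by
          simp [pvTouchedGood, hxy] at hg; simpa using hg.1
        have hy : y ∈ os := by
          simp [pvTouchedGood, hxy] at hg; simpa using hg.2
        have hne : os.idxOf x ≠ os.idxOf y := fun h => hxy (pvIdx_inj os x y hx hy h)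
        have hpre : pvPairA os (x :: xs) (y :: ys) = pvScanA os (x :: xs) (y :: ys) := by
          unfold pvPairA
          have h0 : (((x :: xs).take (y :: ys).length == (y :: ys)) : Bool) = false := by
            simp [List.take_succ_cons, hxy]
          rw [h0, Bool.and_false]
          simp
        rw [hpre]
        simp only [List.map_cons]
        rcases lt_trichotomy (os.idxOf x) (os.idxOf y) with h | h | h
        · have h1 : pvIdx os x < pvIdx os y := by simp only [pvIdx]; exact_mod_cast h
          simp only [pvScanA, h1, if_true, true_iff]
          exact List.Lex.rel h
        · exact absurd h hne
        · have h1 : ¬ pvIdx os x < pvIdx os y := by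
            simp only [pvIdx, not_lt]; exact_mod_cast le_of_lt h
          have h2 : (pvIdx os x == pvIdx os y) = false := by
            simp only [pvIdx, beq_eq_false_iff_ne, ne_eq, Int.natCast_inj]
            exact hne
          simp only [pvScanA, h1, if_false, h2, Bool.false_eq_true, if_false]
          constructor
          · intro h'
            exact absurd h' (by simp)
          · intro hl
            exact absurd hl (pv_lex_asymm _ _ (List.Lex.rel h))

-- the prefix test fires whenever word2 is a prefix of word1 (equality included)
theorem pvPairA_prefix (os : List Char) (a b : List Char) (hp : b <+: a) :
    pvPairA os a b = false := by
  have hlen : b.length ≤ a.length := hp.length_le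
  have htake : a.take b.length = b := (List.prefix_iff_eq_take.mp hp).symm
  unfold pvPairA
  have : ((min a.length b.length == b.length) && (a.take b.length == b)) = true := by
    simp [htake, Nat.min_eq_right hlen]
  rw [this]
  simp

-- pvListLe ignores an equal leading rank
theorem pvListLe_cons_same (r : Int) (xs ys : List Int) :
    pvListLe (r :: xs) (r :: ys) = pvListLe xs ys := by
  simp [pvListLe]

-- B's per-pair check is the non-strict lexicographic comparison of the true rank lists, when
-- the touched characters lie in os
theorem pvListLe_tg_iff (os : List Char) (a b : List Char)
    (hg : pvTouchedGood os a b = true) :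
    pvListLe (pvTransB os a) (pvTransB os b) = true
      ↔ (List.Lex (· < ·) (a.map (fun c => os.idxOf c)) (b.map (fun c => os.idxOf c)) ∨ a = b) := by
  induction a generalizing b with
  | nil =>
    cases b with
    | nil => simp [pvTransB, pvListLe]
    | cons y ys =>
      simp only [pvTransB, List.map_nil, List.map_cons, pvListLe]
      exact ⟨fun _ => Or.inl List.Lex.nil, fun _ => trivial⟩
  | cons x xs ih =>
    cases b with
    | nil => simp [pvTransB, pvListLe, List.not_lex_nil]
    | cons y ys =>
      by_cases hxy : x = y
      · subst hxy
        have hg' : pvTouchedGood os xs ys = true := by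
          simp [pvTouchedGood] at hg; exact hg.2
        have hB : pvListLe (pvTransB os (x :: xs)) (pvTransB os (x :: ys))
            = pvListLe (pvTransB os xs) (pvTransB os ys) := by
          simp only [pvTransB, List.map_cons]
          exact pvListLe_cons_same _ _ _
        rw [hB]
        simp only [List.map_cons]
        rw [List.lex_cons_iff, List.cons_eq_cons]
        rw [ih ys hg']
        simp
      · have hx : x ∈ os := by
          simp [pvTouchedGood, hxy] at hg; simpa using hg.1
        have hy : y ∈ os := by
          simp [pvTouchedGood, hxy] at hg; simpa using hg.2
        have hne : os.idxOf x ≠ os.idxOf y := fun h => hxy (pvIdx_inj os x y hx hy h)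
        have hrx : pvRankB os x = (os.idxOf x : Int) := by simp [pvRankB, hx]
        have hry : pvRankB os y = (os.idxOf y : Int) := by simp [pvRankB, hy]
        simp only [pvTransB, List.map_cons, pvListLe, hrx, hry]
        have heqf : (x :: xs = y :: ys) ↔ False := by simp [hxy]
        rcases lt_trichotomy (os.idxOf x) (os.idxOf y) with h | h | h
        · have h1 : (os.idxOf x : Int) < (os.idxOf y : Int) := by exact_mod_cast h
          simp only [h1, if_true, heqf, or_false, true_iff]
          exact List.Lex.rel h
        · exact absurd h hne
        · have h1 : ¬ (os.idxOf x : Int) < (os.idxOf y : Int) := by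
            rw [not_lt]; exact_mod_cast le_of_lt h
          have h2 : (os.idxOf y : Int) < (os.idxOf x : Int) := by exact_mod_cast h
          simp only [h1, if_false, h2, if_true, heqf, or_false,
            Bool.false_eq_true, false_iff]
          exact pv_lex_asymm _ _ (List.Lex.rel h)

-- when word2 is a proper prefix of word1, B's per-pair check is false
theorem pvListLe_proper_prefix (os : List Char) (a b : List Char) (hp : b <+: a)
    (hne : a ≠ b) : pvListLe (pvTransB os a) (pvTransB os b) = false := by
  obtain ⟨t, rfl⟩ := hp
  have ht : t ≠ [] := by
    intro h
    subst h
    simp at hne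
  clear hne
  induction b with
  | nil =>
    cases t with
    | nil => exact absurd rfl ht
    | cons c u => simp [pvTransB, pvListLe]
  | cons y ys ih =>
    have : (y :: ys) ++ t = y :: (ys ++ t) := rfl
    rw [this]
    simp only [pvTransB, List.map_cons]
    rw [pvListLe_cons_same]
    exact ih

-- pvAlienLtB on strings is the lexicographic comparison of the mapped character lists
theorem pvAlienLtB_iff (order : String) (a b : String) :
    pvAlienLtB order a b = true
      ↔ List.Lex (· < ·) (a.toList.map (fun c => order.toList.idxOf c))
          (b.toList.map (fun c => order.toList.idxOf c)) := by
  simp [pvAlienLtB, pvRanks]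

-- ===== VERDICT (by name: the statement is the Claim_ definition above) =====
theorem isAlienSorted_spec : Claim_unchanged_isAlienSorted := by
  intro words order _ hpre hnd
  rw [pvA_eq_all, pv_alt_reindex]
  rcases hpre with hlen | hall | hex
  · -- at most one word: the pair list is empty
    match words, hlen with
    | [], _ => rfl
    | [w], _ => rfl
  · -- all pairs good and strictly increasing: both alls are true
    have hA : ∀ p ∈ words.zip (words.drop 1),
        pvPairA order.toList p.1.toList p.2.toList = true
        ∧ pvListLe (pvTransB order.toList p.1.toList) (pvTransB order.toList p.2.toList) = true := by
      intro p hp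
      obtain ⟨k, hk, h1, h2⟩ := pv_zip_adj_index words "" p hp
      have hok := List.all_eq_true.mp hall k (List.mem_range.mpr hk)
      unfold pvPairOk at hok
      rw [Bool.and_eq_true] at hok
      have htg : pvTouchedGood order.toList (words.getD k "").toList
          (words.getD (k + 1) "").toList = true := by
        rw [← pvTouched_eq]; exact hok.1
      have hlex := (pvAlienLtB_iff order _ _).mp hok.2
      rw [h1, h2]
      exact ⟨(pvPairA_iff order.toList _ _ htg).mpr hlex,
             (pvListLe_tg_iff order.toList _ _ htg).mpr (Or.inl hlex)⟩
    rw [List.all_eq_true.mpr (fun p hp => (hA p hp).1),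
        List.all_eq_true.mpr (fun p hp => (hA p hp).2)]
  · -- some pair k decides False: A is false there, and so is B (via ¬D_ if the pair is equal)
    obtain ⟨k, hkmem, hprops⟩ := List.any_eq_true.mp hex
    have hk : k < words.length - 1 := List.mem_range.mp hkmem
    rw [Bool.and_eq_true] at hprops
    have hmemk := pv_zip_adj_mem words "" k hk
    have hAk : pvPairA order.toList (words.getD k "").toList (words.getD (k + 1) "").toList
        = false := by
      rw [Bool.or_eq_true] at hprops
      rcases hprops.2 with hp | hgl
      · exact pvPairA_prefix _ _ _ (of_decide_eq_true hp)
      · rw [Bool.and_eq_true] at hgl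
        have htg : pvTouchedGood order.toList (words.getD k "").toList
            (words.getD (k + 1) "").toList = true := by
          rw [← pvTouched_eq]; exact hgl.1
        cases hcase : pvPairA order.toList (words.getD k "").toList (words.getD (k + 1) "").toList
        · rfl
        · exfalso
          have hlex := (pvPairA_iff order.toList _ _ htg).mp hcase
          have := (pvAlienLtB_iff order _ _).mpr hlex
          rw [Bool.not_eq_eq_eq_not, Bool.not_true] at hgl
          rw [hgl.2] at this
          exact Bool.false_ne_true this
    have hAfalse : ((words.zip (words.drop 1)).all
        (fun p => pvPairA order.toList p.1.toList p.2.toList)) = false := by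
      rw [List.all_eq_false]
      exact ⟨_, hmemk, by rw [hAk]; simp⟩
    rw [hAfalse]
    by_cases heqk : words.getD k "" = words.getD (k + 1) ""
    · -- the deciding pair is equal: D_'s second conjunct holds, so ¬D_ forces B false
      have hD2 : ¬ List.IsChain (fun a b => a ≠ b) words :=
        (pvD2_iff words).mpr (List.any_eq_true.mpr ⟨_, hmemk, by simpa using heqk⟩)
      have hnD1 : ¬ List.IsChain
          (fun a b => ¬ List.Lex (· < ·) (pvRanksD order b) (pvRanksD order a)) words :=
        fun hD1 => hnd ⟨hD1, hD2⟩
      rw [pvD1_iff_B_all, Bool.not_eq_true] at hnD1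
      rw [hnD1]
    · -- the deciding pair is not equal: B's check on it is false outright
      have hBk : pvListLe (pvTransB order.toList (words.getD k "").toList)
          (pvTransB order.toList (words.getD (k + 1) "").toList) = false := by
        rw [Bool.or_eq_true] at hprops
        have htne : (words.getD k "").toList ≠ (words.getD (k + 1) "").toList :=
          fun h => heqk (String.toList_inj.mp h)
        rcases hprops.2 with hp | hgl
        · exact pvListLe_proper_prefix _ _ _ (of_decide_eq_true hp) htne
        · rw [Bool.and_eq_true] at hgl
          have htg : pvTouchedGood order.toList (words.getD k "").toList
              (words.getD (k + 1) "").toList = true := by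
            rw [← pvTouched_eq]; exact hgl.1
          cases hcase : pvListLe (pvTransB order.toList (words.getD k "").toList)
              (pvTransB order.toList (words.getD (k + 1) "").toList)
          · rfl
          · exfalso
            rcases (pvListLe_tg_iff order.toList _ _ htg).mp hcase with hlex | heqt
            · have := (pvAlienLtB_iff order _ _).mpr hlex
              rw [Bool.not_eq_eq_eq_not, Bool.not_true] at hgl
              rw [hgl.2] at this
              exact Bool.false_ne_true this
            · exact htne heqt
      rw [List.all_eq_false.mpr ⟨_, hmemk, by rw [hBk]; simp⟩]

theorem isAlienSorted_changed : Claim_changed_isAlienSorted := by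
  unfold Claim_changed_isAlienSorted; decide

theorem isAlienSorted_tight : Claim_exact_isAlienSorted := by
  intro words order _ _ hd
  obtain ⟨hle, heq⟩ := hd
  rw [pvA_eq_all, pv_alt_reindex]
  obtain ⟨p, hp, hpe⟩ := List.any_eq_true.mp ((pvD2_iff words).mp heq)
  have hpe' : p.1 = p.2 := by simpa using hpe
  have hAfalse : ((words.zip (words.drop 1)).all
      (fun p => pvPairA order.toList p.1.toList p.2.toList)) = false := by
    rw [List.all_eq_false]
    refine ⟨p, hp, ?_⟩
    rw [hpe', pvPairA_prefix order.toList _ _ (List.prefix_refl _)]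
    simp
  rw [hAfalse, (pvD1_iff_B_all words order).mp hle]
  exact Bool.false_ne_true
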